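-- pv_equiv track=rewrite | github.com/AndresAp01/Taller_de_Programacion | Examenes_Intro/3_Luis_Acunna_Perez.py | UNO_aux
-- ===== SOURCE A (Python) =====
-- def UNO_aux(num1, num2, largo, indice_actual):
--     if indice_actual>=largo:
--         return []
--     cantidad_pares=(largo+1)//2
--     cantidad_impares=largo//2
--     if indice_actual<cantidad_pares:
--         posicion_primer=2*indice_actual
--     else:
--         if (largo-1)%2==1:
--             indice_impar_maximo=largo-1
--         else:
--             indice_impar_maximo=largo-2
--         paso_extra=indice_actual-cantidad_pares
--         posicion_primer=indice_impar_maximo-2*paso_extra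
--     if indice_actual<cantidad_impares:
--         posicion_segundo=2*indice_actual+1
--     else:
--         if (largo-1)%2==0:
--             indice_par_maximo=largo-1
--         else:
--             indice_par_maximo=largo-2
--         paso_extra2=indice_actual-cantidad_impares
--         posicion_segundo=indice_par_maximo-2*paso_extra2
--     dig1_encontrado=(num1//(10**(largo-1-posicion_primer)))%10
--     dig2_encontrado=(num2//(10**(largo-1-posicion_segundo)))%10
--     sucesor1=dig1_encontrado+1
--     antecesor1=dig1_encontrado-1
--     sucesor2=dig2_encontrado+1
--     antecesor2=dig2_encontrado-1
--
--     digito_primer=[1,0,1, sucesor1, dig1_encontrado, sucesor1+dig1_encontrado-antecesor1, antecesor1,-1,0,-1]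
--     digito_segundo=[-2,0,-2, sucesor2, dig2_encontrado, sucesor2+dig2_encontrado-antecesor2, antecesor2, 2,0,2]
--
--     return [digito_primer, digito_segundo]+UNO_aux(num1, num2, largo, indice_actual+1)
-- ===== SOURCE B (Python) =====
-- def _posicion_primer(largo, i):
--     cantidad_pares = (largo + 1) // 2
--     if i < cantidad_pares:
--         return 2 * i
--     indice_impar_maximo = largo - 1 if (largo - 1) % 2 == 1 else largo - 2
--     return indice_impar_maximo - 2 * (i - cantidad_pares)
--
--
-- def _posicion_segundo(largo, i):
--     cantidad_impares = largo // 2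
--     if i < cantidad_impares:
--         return 2 * i + 1
--     indice_par_maximo = largo - 1 if (largo - 1) % 2 == 0 else largo - 2
--     return indice_par_maximo - 2 * (i - cantidad_impares)
--
--
-- def _digito(num, largo, posicion):
--     return (num // 10 ** (largo - 1 - posicion)) % 10
--
--
-- def UNO_aux(num1, num2, largo, indice_actual):
--     resultado = []
--     for i in range(indice_actual, largo):
--         d1 = _digito(num1, largo, _posicion_primer(largo, i))
--         d2 = _digito(num2, largo, _posicion_segundo(largo, i))
--         resultado.append([1, 0, 1, d1 + 1, d1, d1 + 2, d1 - 1, -1, 0, -1])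
--         resultado.append([-2, 0, -2, d2 + 1, d2, d2 + 2, d2 - 1, 2, 0, 2])
--     return resultado
-- ===== Notes on version B (the rewrite author's own statement) =====
-- stated objective: simpler
-- what changed: Replaces A's self-recursion (one call frame per index, list re-concatenated at each level) by a single iterative for-loop over range(indice_actual, largo) appending rows, with the position/digit arithmetic factored into small named helper functions and the sucesor/antecesor algebra simplified to d+2.
import Mathlib
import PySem

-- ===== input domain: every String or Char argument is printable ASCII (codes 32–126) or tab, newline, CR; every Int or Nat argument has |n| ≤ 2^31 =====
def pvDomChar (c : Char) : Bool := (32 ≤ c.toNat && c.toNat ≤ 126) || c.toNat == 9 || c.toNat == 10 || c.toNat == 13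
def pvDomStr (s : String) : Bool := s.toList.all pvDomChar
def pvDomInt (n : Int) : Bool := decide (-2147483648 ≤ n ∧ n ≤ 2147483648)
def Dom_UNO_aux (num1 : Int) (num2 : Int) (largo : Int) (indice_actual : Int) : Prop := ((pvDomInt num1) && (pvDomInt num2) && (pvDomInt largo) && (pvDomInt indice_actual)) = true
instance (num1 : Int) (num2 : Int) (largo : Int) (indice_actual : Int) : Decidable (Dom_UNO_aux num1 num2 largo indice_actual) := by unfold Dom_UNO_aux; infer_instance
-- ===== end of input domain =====

-- B replaces A's recursion by a single loop over range(indice_actual, largo) with small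
-- position/digit helper functions (objective: simpler decomposition; same cost).

-- ===== PORT A =====
-- Note on 10**e: whenever A's body executes (indice_actual < largo) the exponent
-- largo-1-posicion is ≥ 0, so Int exponentiation via .toNat is exact there.
def UNO_aux (num1 : Int) (num2 : Int) (largo : Int) (indice_actual : Int) : List (List Int) :=
  if indice_actual ≥ largo then []
  else
    let cantidad_pares := PySem.Int.floordiv (largo + 1) 2
    let cantidad_impares := PySem.Int.floordiv largo 2
    let posicion_primer :=
      if indice_actual < cantidad_pares then 2 * indice_actual
      else
        let indice_impar_maximo :=
          if PySem.Int.mod (largo - 1) 2 = 1 then largo - 1 else largo - 2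
        let paso_extra := indice_actual - cantidad_pares
        indice_impar_maximo - 2 * paso_extra
    let posicion_segundo :=
      if indice_actual < cantidad_impares then 2 * indice_actual + 1
      else
        let indice_par_maximo :=
          if PySem.Int.mod (largo - 1) 2 = 0 then largo - 1 else largo - 2
        let paso_extra2 := indice_actual - cantidad_impares
        indice_par_maximo - 2 * paso_extra2
    let dig1_encontrado :=
      PySem.Int.mod (PySem.Int.floordiv num1 ((10 : Int) ^ (largo - 1 - posicion_primer).toNat)) 10
    let dig2_encontrado :=
      PySem.Int.mod (PySem.Int.floordiv num2 ((10 : Int) ^ (largo - 1 - posicion_segundo).toNat)) 10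
    let sucesor1 := dig1_encontrado + 1
    let antecesor1 := dig1_encontrado - 1
    let sucesor2 := dig2_encontrado + 1
    let antecesor2 := dig2_encontrado - 1
    let digito_primer := [1, 0, 1, sucesor1, dig1_encontrado,
      sucesor1 + dig1_encontrado - antecesor1, antecesor1, -1, 0, -1]
    let digito_segundo := [-2, 0, -2, sucesor2, dig2_encontrado,
      sucesor2 + dig2_encontrado - antecesor2, antecesor2, 2, 0, 2]
    [digito_primer, digito_segundo] ++ UNO_aux num1 num2 largo (indice_actual + 1)
termination_by (largo - indice_actual).toNat
decreasing_by omega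

-- ===== PORT B =====
def pvPosicionPrimer (largo : Int) (i : Int) : Int :=
  let cantidad_pares := PySem.Int.floordiv (largo + 1) 2
  if i < cantidad_pares then 2 * i
  else
    let indice_impar_maximo :=
      if PySem.Int.mod (largo - 1) 2 = 1 then largo - 1 else largo - 2
    indice_impar_maximo - 2 * (i - cantidad_pares)

def pvPosicionSegundo (largo : Int) (i : Int) : Int :=
  let cantidad_impares := PySem.Int.floordiv largo 2
  if i < cantidad_impares then 2 * i + 1
  else
    let indice_par_maximo :=
      if PySem.Int.mod (largo - 1) 2 = 0 then largo - 1 else largo - 2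
    indice_par_maximo - 2 * (i - cantidad_impares)

def pvDigito (num : Int) (largo : Int) (posicion : Int) : Int :=
  PySem.Int.mod (PySem.Int.floordiv num ((10 : Int) ^ (largo - 1 - posicion).toNat)) 10

def UNO_aux_alt (num1 : Int) (num2 : Int) (largo : Int) (indice_actual : Int) : List (List Int) :=
  (PySem.List.pyRange indice_actual largo 1).foldl
    (fun resultado i =>
      let d1 := pvDigito num1 largo (pvPosicionPrimer largo i)
      let d2 := pvDigito num2 largo (pvPosicionSegundo largo i)
      resultado ++ [[1, 0, 1, d1 + 1, d1, d1 + 2, d1 - 1, -1, 0, -1]]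
        ++ [[-2, 0, -2, d2 + 1, d2, d2 + 2, d2 - 1, 2, 0, 2]])
    []

-- ===== PRECONDITION & SPEC =====
def Spec_UNO_aux (num1 : Int) (num2 : Int) (largo : Int) (indice_actual : Int) (out : List (List Int)) : Prop := out = UNO_aux_alt num1 num2 largo indice_actual
instance (num1 : Int) (num2 : Int) (largo : Int) (indice_actual : Int) (out : List (List Int)) : Decidable (Spec_UNO_aux num1 num2 largo indice_actual out) := by unfold Spec_UNO_aux; infer_instance

-- ===== CLAIM (what is proved, stated in full; the proofs are below) =====
def Claim_equal_UNO_aux : Prop := ∀ (num1 : Int) (num2 : Int) (largo : Int) (indice_actual : Int), Dom_UNO_aux num1 num2 largo indice_actual → Spec_UNO_aux num1 num2 largo indice_actual (UNO_aux num1 num2 largo indice_actual)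

-- ===== LEMMAS AND PROOFS =====

-- One unfolding step of A for indice_actual < largo, with its rows written via B's helpers.
lemma UNO_aux_step (num1 num2 largo i : Int) (h : i < largo) :
    UNO_aux num1 num2 largo i =
      (let d1 := pvDigito num1 largo (pvPosicionPrimer largo i)
       let d2 := pvDigito num2 largo (pvPosicionSegundo largo i)
       [[1, 0, 1, d1 + 1, d1, d1 + 2, d1 - 1, -1, 0, -1],
        [-2, 0, -2, d2 + 1, d2, d2 + 2, d2 - 1, 2, 0, 2]])
      ++ UNO_aux num1 num2 largo (i + 1) := by
  rw [UNO_aux]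
  simp only [if_neg (not_le.mpr h), pvDigito, pvPosicionPrimer, pvPosicionSegundo]
  have hr : ∀ d : Int, d + 1 + d - (d - 1) = d + 2 := by intro d; ring
  simp only [hr]

-- The loop of B, started from any accumulator, appends exactly A's result.
lemma UNO_aux_loop (num1 num2 largo : Int) :
    ∀ (k : Nat) (i : Int), (largo - i).toNat = k → ∀ acc : List (List Int),
      (PySem.List.pyRange i largo 1).foldl
        (fun resultado i =>
          let d1 := pvDigito num1 largo (pvPosicionPrimer largo i)
          let d2 := pvDigito num2 largo (pvPosicionSegundo largo i)
          resultado ++ [[1, 0, 1, d1 + 1, d1, d1 + 2, d1 - 1, -1, 0, -1]]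
            ++ [[-2, 0, -2, d2 + 1, d2, d2 + 2, d2 - 1, 2, 0, 2]]) acc
      = acc ++ UNO_aux num1 num2 largo i := by
  intro k
  induction k with
  | zero =>
    intro i hk acc
    have hle : largo ≤ i := by omega
    rw [PySem.List.pyRange_one_eq_nil hle, UNO_aux]
    simp [hle]
  | succ n ih =>
    intro i hk acc
    have hlt : i < largo := by omega
    rw [PySem.List.pyRange_one_cons hlt]
    simp only [List.foldl_cons]
    rw [ih (i + 1) (by omega), UNO_aux_step num1 num2 largo i hlt]
    simp

-- ===== VERDICT (by name: the statement is the Claim_ definition above) =====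
theorem UNO_aux_spec : Claim_equal_UNO_aux := by
  intro num1 num2 largo indice_actual _
  unfold Spec_UNO_aux UNO_aux_alt
  exact (UNO_aux_loop num1 num2 largo (largo - indice_actual).toNat indice_actual rfl []).symm
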